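-- pv_equiv track=rewrite | github.com/Belegkarnil/distributed-deep-learning | src/pytorch/LSTM/model.py | model_partition
-- ===== SOURCE A (Python) =====
-- def model_partition(layers,ndevices):
--     if(layers == ndevices):
--         return {i:i for i in range(layers)}
--     nhidden	= layers - 3
--     step		= nhidden // ndevices
--     rest		= nhidden - step*ndevices
--     split		= {0:0}
--     #
--     current			= step
--     partition_id	= 0
--     if(step < 1):
--         partition_id += 1
--         current = 1
--     for (lstm_id, layer_id) in enumerate(range(2,nhidden+2)):
--         split[layer_id] = partition_id
--         current -= 1
--         if(current < 1):
--             current = step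
--             partition_id += 1
--             if(rest > 0):
--                 current	+= 1
--                 rest		-= 1
--     # last layer
--     split[layers-1]	= min(ndevices-1, max(split.values()) + 1)
--     # second layer (pooling)
--     split[1] = (split[2] - split[0])//2
--     return split
-- ===== SOURCE B (Python) =====
-- def model_partition(layers, ndevices):
--     if layers == ndevices:
--         return {i: i for i in range(layers)}
--     nhidden = layers - 3
--     step = nhidden // ndevices
--     rest = nhidden - step * ndevices
--     # Block decomposition: the first block holds `step` LSTM layers (one layer,
--     # with partition ids starting at 1, when step < 1); each later block holds
--     # step+1 layers while `rest` extras remain, then step (at least one each).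
--     pid, b = (1, 1) if step < 1 else (0, step)
--     split = {0: 0}
--     layer = 2
--     remaining = nhidden
--     while remaining > 0:
--         take = min(max(b, 1), remaining)
--         for l in range(layer, layer + take):
--             split[l] = pid
--         layer += take
--         remaining -= take
--         pid += 1
--         if rest > 0:
--             b = step + 1
--             rest -= 1
--         else:
--             b = step
--     top = pid - 1 if nhidden > 0 else 0
--     split[layers - 1] = min(ndevices - 1, top + 1)
--     split[1] = (split[2] - split[0]) // 2
--     return split
-- ===== Notes on version B (the rewrite author's own statement) =====
-- stated objective: alternative
-- what changed: B replaces A's per-layer countdown loop (current/partition_id/rest mutated on every layer) by a block decomposition: it assigns whole partition blocks at once (first block of step layers, then blocks of step+1 while rest extras remain, at least one layer each) and reads the top partition id off the block counter instead of scanning the dict values for the max.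
import Mathlib
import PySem

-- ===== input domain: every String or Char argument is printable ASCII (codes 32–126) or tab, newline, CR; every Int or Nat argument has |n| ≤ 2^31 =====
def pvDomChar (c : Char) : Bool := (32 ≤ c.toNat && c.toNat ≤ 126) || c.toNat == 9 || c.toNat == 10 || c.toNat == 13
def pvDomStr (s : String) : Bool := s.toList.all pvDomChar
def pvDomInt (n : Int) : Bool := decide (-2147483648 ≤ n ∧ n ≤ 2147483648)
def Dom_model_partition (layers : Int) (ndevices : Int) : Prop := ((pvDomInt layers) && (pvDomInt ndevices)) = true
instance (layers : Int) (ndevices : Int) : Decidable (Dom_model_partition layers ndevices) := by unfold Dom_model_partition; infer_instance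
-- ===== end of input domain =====

-- B replaces A's per-layer countdown loop by a per-block decomposition (chunks of
-- partition block sizes assigned at once, top partition read off the block counter);
-- objective: alternative decomposition, same cost.

-- ===== PORT A =====
-- A's loop body; `enumerate`'s lstm_id is never read, so the fold runs over the
-- range itself (exact). State = (split, current, partition_id, rest).
def pvBodyA (step : Int) (st : PySem.Dict Int Int × Int × Int × Int) (layer_id : Int) :
    PySem.Dict Int Int × Int × Int × Int :=
  let split := st.1.insert layer_id st.2.2.1
  let current := st.2.1 - 1
  if current < 1 then
    let current := step
    let partition_id := st.2.2.1 + 1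
    if st.2.2.2 > 0 then (split, current + 1, partition_id, st.2.2.2 - 1)
    else (split, current, partition_id, st.2.2.2)
  else (split, current, st.2.2.1, st.2.2.2)

def model_partition (layers : Int) (ndevices : Int) : List (Int × Int) :=
  if layers = ndevices then
    (PySem.List.pyRange 0 layers 1).map (fun i => (i, i))
  else
    let nhidden := layers - 3
    let step := PySem.Int.floordiv nhidden ndevices      -- ndevices ≠ 0 by Pre_ (else ZeroDivisionError)
    let rest := nhidden - step * ndevices
    let split : PySem.Dict Int Int := PySem.Dict.ofList [(0, 0)]
    let cp : Int × Int := if step < 1 then (1, 1) else (step, 0)   -- (current, partition_id)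
    let st := (PySem.List.pyRange 2 (nhidden + 2) 1).foldl (pvBodyA step) (split, cp.1, cp.2, rest)
    let split := st.1
    -- max(split.values()): split is nonempty (holds key 0), so max? is some (exact)
    let split := split.insert (layers - 1)
      (min (ndevices - 1) ((PySem.List.max? split.values (fun v => v)).getD 0 + 1))
    -- split[2] and split[0] are present under Pre_ (else KeyError), so getD is exact
    let split := split.insert 1 (PySem.Int.floordiv (split.getD 2 0 - split.getD 0 0) 2)
    split.items

-- ===== PORT B =====
-- B's while loop: assign whole blocks. State = (split, layer, remaining, pid, b, rest);
-- returns (split, final pid).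
def pvBLoop (step : Int) (split : PySem.Dict Int Int) (layer remaining pid b rest : Int) :
    PySem.Dict Int Int × Int :=
  if h : remaining ≤ 0 then (split, pid)
  else
    let take := min (max b 1) remaining
    let split := (PySem.List.pyRange layer (layer + take) 1).foldl (fun d l => d.insert l pid) split
    pvBLoop step split (layer + take) (remaining - take) (pid + 1)
      (if rest > 0 then step + 1 else step) (if rest > 0 then rest - 1 else rest)
  termination_by remaining.toNat
  decreasing_by
    have h1 : (1 : Int) ≤ min (max b 1) remaining := by omega
    omega

def model_partition_alt (layers : Int) (ndevices : Int) : List (Int × Int) :=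
  if layers = ndevices then
    (PySem.List.pyRange 0 layers 1).map (fun i => (i, i))
  else
    let nhidden := layers - 3
    let step := PySem.Int.floordiv nhidden ndevices
    let rest := nhidden - step * ndevices
    let pb : Int × Int := if step < 1 then (1, 1) else (0, step)   -- (pid, b)
    let res := pvBLoop step (PySem.Dict.ofList [(0, 0)]) 2 nhidden pb.1 pb.2 rest
    let split := res.1
    let top := if nhidden > 0 then res.2 - 1 else 0
    let split := split.insert (layers - 1) (min (ndevices - 1) (top + 1))
    let split := split.insert 1 (PySem.Int.floordiv (split.getD 2 0 - split.getD 0 0) 2)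
    split.items

-- ===== PRECONDITION & SPEC =====
-- Pre_ excludes exactly the inputs on which A raises: ndevices = 0 with layers ≠ ndevices
-- (ZeroDivisionError) and layers ≤ 2 with layers ≠ ndevices (KeyError on split[2]).
def Pre_model_partition (layers : Int) (ndevices : Int) : Prop :=
  layers = ndevices ∨ (ndevices ≠ 0 ∧ 3 ≤ layers)
instance (layers : Int) (ndevices : Int) : Decidable (Pre_model_partition layers ndevices) := by
  unfold Pre_model_partition; infer_instance

def pvWitness_model_partition : Int × Int := (10, 3)

def Spec_model_partition (layers : Int) (ndevices : Int) (out : List (Int × Int)) : Prop :=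
  out = model_partition_alt layers ndevices
instance (layers : Int) (ndevices : Int) (out : List (Int × Int)) :
    Decidable (Spec_model_partition layers ndevices out) := by
  unfold Spec_model_partition; infer_instance

-- ===== CLAIM (what is proved, stated in full; the proofs are below) =====
def Claim_equal_model_partition : Prop :=
  ∀ (layers : Int) (ndevices : Int), Dom_model_partition layers ndevices →
    Pre_model_partition layers ndevices →
    Spec_model_partition layers ndevices (model_partition layers ndevices)

-- ===== LEMMAS AND PROOFS =====

-- One A-step absorbed into pvBLoop (dict component): stepping identity.
theorem pvBLoop_step_absorb (step : Int) (d : PySem.Dict Int Int) (layer pid b rest : Int)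
    (n : Int) (hn : 1 ≤ n) :
    (pvBLoop step d layer n pid b rest).1 =
      (if b - 1 < 1 then
        (if rest > 0 then
          pvBLoop step (d.insert layer pid) (layer + 1) (n - 1) (pid + 1) (step + 1) (rest - 1)
         else
          pvBLoop step (d.insert layer pid) (layer + 1) (n - 1) (pid + 1) step rest)
       else
        pvBLoop step (d.insert layer pid) (layer + 1) (n - 1) pid (b - 1) rest).1 := by
  have h0 : ¬ n ≤ 0 := by omega
  by_cases hb : b - 1 < 1
  · conv_lhs => rw [pvBLoop]
    simp only [dif_neg h0]
    have ht : min (max b 1) n = 1 := by omega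
    rw [ht, PySem.List.pyRange_one_singleton]
    simp only [List.foldl_cons, List.foldl_nil, if_pos hb]
    split_ifs with hr <;> rfl
  · rw [if_neg hb]
    conv_lhs => rw [pvBLoop]
    simp only [dif_neg h0]
    have ht : min (max b 1) n = min b n := by omega
    rw [ht]
    by_cases h1 : n - 1 ≤ 0
    · -- n = 1: both sides are d.insert layer pid
      have hn1 : n = 1 := by omega
      subst hn1
      rw [min_eq_right (by omega : (1:Int) ≤ b), PySem.List.pyRange_one_singleton]
      simp only [List.foldl_cons, List.foldl_nil]
      conv_lhs => rw [pvBLoop]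
      conv_rhs => rw [pvBLoop]
      norm_num
    · conv_rhs => rw [pvBLoop]
      simp only [dif_neg h1]
      have ht' : min (max (b - 1) 1) (n - 1) = min b n - 1 := by omega
      rw [ht']
      rw [PySem.List.pyRange_one_cons (by omega : layer < layer + min b n)]
      simp only [List.foldl_cons]
      have e1 : layer + 1 + (min b n - 1) = layer + min b n := by ring
      have e2 : n - 1 - (min b n - 1) = n - min b n := by ring
      rw [e1, e2]

-- Core: A's fold over the layer range produces the same dict as B's block loop.
theorem pvCore (step : Int) : ∀ (n : Nat) (d : PySem.Dict Int Int) (layer c p r : Int),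
    ((PySem.List.pyRange layer (layer + (n : Int)) 1).foldl (pvBodyA step) (d, c, p, r)).1 =
      (pvBLoop step d layer (n : Int) p c r).1 := by
  intro n
  induction n with
  | zero =>
    intro d layer c p r
    rw [PySem.List.pyRange_one_eq_nil (by omega)]
    rw [pvBLoop]
    simp
  | succ k ih =>
    intro d layer c p r
    have hcast : ((k + 1 : Nat) : Int) = (k : Int) + 1 := by push_cast; ring
    rw [hcast]
    rw [PySem.List.pyRange_one_cons (by omega : layer < layer + ((k : Int) + 1))]
    simp only [List.foldl_cons]
    rw [pvBLoop_step_absorb step d layer p c r ((k : Int) + 1) (by omega)]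
    have e1 : (k : Int) + 1 - 1 = (k : Int) := by ring
    have e2 : layer + ((k : Int) + 1) = layer + 1 + (k : Int) := by ring
    rw [e1, e2]
    unfold pvBodyA
    by_cases hc : c - 1 < 1
    · simp only [if_pos hc]
      by_cases hr : r > 0
      · simp only [if_pos hr]
        exact ih (d.insert layer p) (layer + 1) (step + 1) (p + 1) (r - 1)
      · simp only [if_neg hr]
        exact ih (d.insert layer p) (layer + 1) step (p + 1) r
    · simp only [if_neg hc]
      exact ih (d.insert layer p) (layer + 1) (c - 1) p r

-- B's final pid: pid - 1 is the maximum value in the produced dict.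
theorem pvBLoop_max (step : Int) : ∀ (fuel : Nat) (n : Int) (d : PySem.Dict Int Int) (layer p b r : Int),
    n.toNat ≤ fuel → 0 < n →
    (∀ v ∈ d.values, v ≤ p) →
    (∀ k ∈ d.keys, k < layer) →
    (((pvBLoop step d layer n p b r).2 - 1) ∈ (pvBLoop step d layer n p b r).1.values ∧
      ∀ v ∈ (pvBLoop step d layer n p b r).1.values, v ≤ (pvBLoop step d layer n p b r).2 - 1) := by
  intro fuel
  induction fuel with
  | zero => intro n d layer p b r hf hn _ _; omega
  | succ fuel ih =>
    intro n d layer p b r hf hn hv hk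
    rw [pvBLoop]
    simp only [dif_neg (by omega : ¬ n ≤ 0)]
    have htake : 1 ≤ min (max b 1) n := by omega
    have hfresh : ∀ a ∈ PySem.List.pyRange layer (layer + min (max b 1) n) 1,
        d.contains ((fun a => a) a) = false := by
      intro a ha
      rw [PySem.List.mem_pyRange_one] at ha
      cases hc : d.contains a with
      | false => rfl
      | true =>
        have := hk a (((PySem.Dict.contains_iff_mem_keys d a).1 hc))
        omega
    have hnodup : ((PySem.List.pyRange layer (layer + min (max b 1) n) 1).map (fun a => a)).Nodup := by
      rw [List.map_id']
      exact PySem.List.nodup_pyRange_one layer (layer + min (max b 1) n)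
    have hitems := PySem.Dict.items_foldl_insert_fresh
      (PySem.List.pyRange layer (layer + min (max b 1) n) 1) (fun a => a) (fun _ => p) d hfresh hnodup
    set d' := (PySem.List.pyRange layer (layer + min (max b 1) n) 1).foldl (fun d l => d.insert l p) d with hd'
    have hvals : d'.values = d.values ++ List.replicate (min (max b 1) n).toNat p := by
      show d'.items.map Prod.snd = _
      rw [hitems]
      simp [PySem.Dict.values, Function.comp_def, PySem.List.length_pyRange_one]
    have hvp : ∀ v ∈ d'.values, v ≤ p := by
      intro v hvm
      rw [hvals, List.mem_append] at hvm
      rcases hvm with h | h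
      · exact hv v h
      · have := (List.eq_of_mem_replicate h); omega
    have hpmem : p ∈ d'.values := by
      rw [hvals, List.mem_append]
      right
      exact List.mem_replicate.2 ⟨by omega, rfl⟩
    have hkeys' : ∀ k ∈ d'.keys, k < layer + min (max b 1) n := by
      have hkeq : d'.keys = d.keys ++ PySem.List.pyRange layer (layer + min (max b 1) n) 1 := by
        show d'.items.map Prod.fst = _
        rw [hitems]
        simp [PySem.Dict.keys, Function.comp_def]
      intro k hkm
      rw [hkeq, List.mem_append] at hkm
      rcases hkm with h | h
      · have := hk k h; omega
      · exact (PySem.List.mem_pyRange_one.1 h).2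
    by_cases hstop : n - min (max b 1) n ≤ 0
    · rw [pvBLoop]
      simp only [dif_pos hstop]
      constructor
      · simpa using hpmem
      · intro v hvm
        have := hvp v hvm
        omega
    · exact ih (n - min (max b 1) n) d' (layer + min (max b 1) n) (p + 1) _ _
        (by omega) (by omega)
        (fun v hvm => by have := hvp v hvm; omega)
        hkeys'

theorem pvMax_eq (xs : List Int) (m : Int) (h1 : m ∈ xs) (h2 : ∀ y ∈ xs, y ≤ m) :
    PySem.List.max? xs (fun v => v) = some m := by
  cases hx : PySem.List.max? xs (fun v => v) with
  | none => rw [PySem.List.max?_eq_none_iff] at hx; subst hx; simp at h1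
  | some m' =>
    have hmem := PySem.List.max?_mem hx
    have hle := PySem.List.max?_isMax hx
    have := h2 m' hmem
    have := hle m h1
    simp_all [le_antisymm this ‹m' ≤ m›]

-- ===== VERDICT (by name: the statement is the Claim_ definition above) =====
theorem model_partition_spec : Claim_equal_model_partition := by
  intro layers ndevices hdom hpre
  unfold Spec_model_partition model_partition model_partition_alt
  by_cases heq : layers = ndevices
  · simp [heq]
  · rcases hpre with hnd | ⟨hnd0, hl3⟩
    · exact absurd hnd heq
    simp only [if_neg heq]
    have hnn : (0 : Int) ≤ layers - 3 := by omega
    -- abbreviations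
    set step := PySem.Int.floordiv (layers - 3) ndevices with hstepdef
    set rest := layers - 3 - step * ndevices with hrestdef
    set d0 : PySem.Dict Int Int := PySem.Dict.ofList [(0, 0)] with hd0
    set cp : Int × Int := if step < 1 then ((1 : Int), (1 : Int)) else (step, 0) with hcp
    set pb : Int × Int := if step < 1 then ((1 : Int), (1 : Int)) else (0, step) with hpb
    have hswap : cp.2 = pb.1 ∧ cp.1 = pb.2 := by
      rw [hcp, hpb]; split_ifs <;> exact ⟨rfl, rfl⟩
    -- A's loop dict = B's block-loop dict
    have hdict : ((PySem.List.pyRange 2 (layers - 3 + 2) 1).foldl (pvBodyA step) (d0, cp.1, cp.2, rest)).1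
        = (pvBLoop step d0 2 (layers - 3) pb.1 pb.2 rest).1 := by
      have h := pvCore step (layers - 3).toNat d0 2 cp.1 cp.2 rest
      rw [Int.toNat_of_nonneg hnn] at h
      rw [show (2 : Int) + (layers - 3) = layers - 3 + 2 by ring] at h
      rw [h, hswap.1, hswap.2]
    -- the top partition id
    have hvals0 : d0.values = [0] := by rw [hd0]; rfl
    have hkeys0 : d0.keys = [0] := by rw [hd0]; rfl
    have hmax : (PySem.List.max? (pvBLoop step d0 2 (layers - 3) pb.1 pb.2 rest).1.values
          (fun v => v)).getD 0
        = (if layers - 3 > 0 then (pvBLoop step d0 2 (layers - 3) pb.1 pb.2 rest).2 - 1 else 0) := by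
      by_cases hz : layers - 3 > 0
      · have hp0 : (0 : Int) ≤ pb.1 := by rw [hpb]; split_ifs <;> norm_num
        have hm := pvBLoop_max step (layers - 3).toNat (layers - 3) d0 2 pb.1 pb.2 rest
          (le_refl _) hz
          (by intro v hv; rw [hvals0] at hv; simp at hv; omega)
          (by intro k hk; rw [hkeys0] at hk; simp at hk; omega)
        rw [pvMax_eq _ _ hm.1 hm.2]
        simp only [Option.getD_some, if_pos hz]
      · have hz0 : layers - 3 = 0 := by omega
        rw [hz0]
        rw [pvBLoop]
        simp only [le_refl, dif_pos]
        rw [hvals0]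
        rw [pvMax_eq [(0 : Int)] 0 (by simp) (by intro y hy; simp at hy; omega)]
        norm_num
    rw [hdict, hmax]
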